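-- pv_equiv track=rewrite | github.com/chen0040/keras-english-resume-parser-and-analyzer | keras_en_parser_and_analyzer/library/utility/parser_rules.py | extract_mobile
-- ===== SOURCE A (Python) =====
-- def extract_mobile(parts, line):
--     found = False
--     education = None
--     for w in parts:
--         if 'mobile' in w:
--             found = True
--             continue
--         if found and ':' not in w:
--             education = w
--             break
--     return education
-- ===== SOURCE B (Python) =====
-- def extract_mobile(parts, line):
--     # One backward pass: cand = first token of the current suffix containing
--     # neither 'mobile' nor ':', ans = the answer for the current suffix.
--     cand = None
--     ans = None
--     for w in reversed(parts):
--         if 'mobile' in w: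
--             ans = cand
--         elif ':' not in w:
--             cand = w
--     return ans
-- ===== Notes on version B (the rewrite author's own statement) =====
-- stated objective: alternative
-- what changed: Replaces the flag-driven forward loop with a single backward fold over reversed(parts) maintaining two accumulators (the first eligible token of the suffix, and the answer), so no found-flag or forward search remains.
import Mathlib
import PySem

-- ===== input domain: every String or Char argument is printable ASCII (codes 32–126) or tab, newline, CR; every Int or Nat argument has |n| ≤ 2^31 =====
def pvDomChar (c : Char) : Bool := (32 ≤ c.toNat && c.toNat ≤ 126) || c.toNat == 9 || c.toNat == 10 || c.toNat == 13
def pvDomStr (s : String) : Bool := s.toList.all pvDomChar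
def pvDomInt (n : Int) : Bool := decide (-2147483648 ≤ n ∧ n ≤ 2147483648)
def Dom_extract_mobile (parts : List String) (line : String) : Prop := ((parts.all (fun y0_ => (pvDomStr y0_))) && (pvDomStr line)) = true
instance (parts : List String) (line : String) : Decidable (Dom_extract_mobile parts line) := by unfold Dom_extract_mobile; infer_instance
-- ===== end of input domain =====

-- B replaces A's flag-driven forward loop by a single backward fold with two accumulators (alternative objective); same return value.
-- ===== PORT A =====
def extract_mobile_loop (ws : List String) (found : Bool) : Option String :=
  match ws with
  | [] => none
  | w :: rest =>
    if PySem.Str.isIn "mobile" w then extract_mobile_loop rest true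
    else if found && !(PySem.Str.isIn ":" w) then some w
    else extract_mobile_loop rest found

def extract_mobile (parts : List String) (line : String) : Option String :=
  extract_mobile_loop parts false

-- ===== PORT B =====
-- one step of B's backward loop; state = (cand, ans)
def extract_mobile_alt_step (st : Option String × Option String) (w : String) : Option String × Option String :=
  if PySem.Str.isIn "mobile" w then (st.1, st.1)
  else if !(PySem.Str.isIn ":" w) then (some w, st.2)
  else st

def extract_mobile_alt (parts : List String) (line : String) : Option String :=
  (parts.reverse.foldl extract_mobile_alt_step (none, none)).2

-- ===== PRECONDITION & SPEC =====
def Spec_extract_mobile (parts : List String) (line : String) (out : Option String) : Prop := out = extract_mobile_alt parts line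
instance (parts : List String) (line : String) (out : Option String) : Decidable (Spec_extract_mobile parts line out) := by unfold Spec_extract_mobile; infer_instance

-- ===== CLAIM (what is proved, stated in full; the proofs are below) =====
def Claim_equal_extract_mobile : Prop := ∀ (parts : List String) (line : String), Dom_extract_mobile parts line → Spec_extract_mobile parts line (extract_mobile parts line)

-- ===== LEMMAS AND PROOFS =====
-- B's backward fold computes (answer-if-mobile-already-seen, answer) for the suffix
theorem extract_mobile_fold_eq (ws : List String) :
    ws.foldr (fun w st => extract_mobile_alt_step st w) (none, none)
      = (extract_mobile_loop ws true, extract_mobile_loop ws false) := by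
  induction ws with
  | nil => rfl
  | cons w rest ih =>
    simp only [List.foldr]
    rw [ih]
    simp only [extract_mobile_alt_step, extract_mobile_loop]
    by_cases hm : PySem.Chars.isIn ['m','o','b','i','l','e'] w.toList = true
    · simp [hm]
    · by_cases hc : PySem.Chars.isIn [':'] w.toList = true
      · simp [hm, hc]
      · simp [hm, hc]

-- ===== VERDICT (by name: the statement is the Claim_ definition above) =====
theorem extract_mobile_spec : Claim_equal_extract_mobile := by
  intro parts line _
  unfold Spec_extract_mobile extract_mobile extract_mobile_alt
  rw [List.foldl_reverse, extract_mobile_fold_eq]
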